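-- pv_equiv track=rewrite | github.com/lbreede/advent-of-code | 2018/python/03/main.py | drawMultipleSquares
-- ===== SOURCE A (Python) =====
-- def drawMultipleSquares(grid, claim_list):
-- 	k = 1
-- 	for claim in claim_list:
-- 		height = claim[4]
-- 		width = claim[3]
-- 		fromTop = claim[2]
-- 		fromLeft = claim[1]
-- 		claim_id = claim[0]
-- 		for i in range(height):
-- 			for j in range(width):
-- 				pos = grid[fromTop + i][fromLeft + j]
-- 				if pos == ".":
-- 					grid[fromTop + i][fromLeft + j] = str(claim_id)
-- 				else:
-- 					grid[fromTop + i][fromLeft + j] = "X"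
-- 		k += 1
-- 	return grid
-- ===== SOURCE B (Python) =====
-- def drawMultipleSquares(grid, claim_list):
--     # Pass 1: build a coverage table coord -> (count, first claim id), no painting yet.
--     cover = {}
--     for claim in claim_list:
--         claim_id = claim[0]
--         from_left = claim[1]
--         from_top = claim[2]
--         width = claim[3]
--         height = claim[4]
--         for i in range(height):
--             for j in range(width):
--                 key = (from_top + i, from_left + j)
--                 if key in cover:
--                     count, first_id = cover[key]
--                     cover[key] = (count + 1, first_id)
--                 else:
--                     cover[key] = (1, claim_id)
--     # Pass 2: write each covered coordinate once.
--     for (r, c), (count, claim_id) in cover.items():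
--         cell = grid[r][c]
--         grid[r][c] = str(claim_id) if count == 1 and cell == "." else "X"
--     return grid
-- ===== Notes on version B (the rewrite author's own statement) =====
-- stated objective: alternative
-- what changed: Instead of painting the grid claim by claim (repainting overlapped cells as it goes), B first builds a coverage dictionary coord -> (count, first claim id) in one pass over the claims and then writes each covered coordinate exactly once in a second pass.
import Mathlib
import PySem

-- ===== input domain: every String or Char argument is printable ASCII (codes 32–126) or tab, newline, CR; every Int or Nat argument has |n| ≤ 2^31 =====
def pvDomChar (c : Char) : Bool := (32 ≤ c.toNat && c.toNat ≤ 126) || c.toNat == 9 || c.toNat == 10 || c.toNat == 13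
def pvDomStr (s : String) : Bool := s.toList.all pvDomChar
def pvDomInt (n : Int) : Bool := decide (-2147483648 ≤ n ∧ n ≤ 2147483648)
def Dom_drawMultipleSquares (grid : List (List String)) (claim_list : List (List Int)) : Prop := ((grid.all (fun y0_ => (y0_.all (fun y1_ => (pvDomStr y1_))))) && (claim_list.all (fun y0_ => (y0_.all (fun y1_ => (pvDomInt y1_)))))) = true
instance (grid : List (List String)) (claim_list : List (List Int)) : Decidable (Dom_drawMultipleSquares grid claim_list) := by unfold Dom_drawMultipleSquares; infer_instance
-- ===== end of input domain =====

-- B replaces A's claim-by-claim repainting by a coverage table (coord -> (count, first id))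
-- built in one pass, followed by a single write per covered coordinate (alternative
-- decomposition, same asymptotic cost). Both A and B mutate `grid` in place in Python and
-- return it; the Python mutation is identical, and the equivalence proved here is about the
-- returned value.

-- ===== PORT A =====
-- one Python body iteration: pos = grid[r][c]; grid[r][c] = str(cid) if pos == "." else "X"
def pvPaint (g : List (List String)) (r c : Int) (cid : Int) : List (List String) :=
  let pos := PySem.List.pyGetD (PySem.List.pyGetD g r []) c ""
  if pos == "." then
    PySem.List.pySetD g r (PySem.List.pySetD (PySem.List.pyGetD g r []) c (PySem.Int.toStr cid))
  else
    PySem.List.pySetD g r (PySem.List.pySetD (PySem.List.pyGetD g r []) c "X")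

def drawMultipleSquares (grid : List (List String)) (claim_list : List (List Int)) : List (List String) :=
  (claim_list.foldl (fun (st : List (List String) × Int) claim =>
      let height := PySem.List.pyGetD claim 4 0
      let width := PySem.List.pyGetD claim 3 0
      let fromTop := PySem.List.pyGetD claim 2 0
      let fromLeft := PySem.List.pyGetD claim 1 0
      let claim_id := PySem.List.pyGetD claim 0 0
      let g := (PySem.List.pyRange 0 height 1).foldl (fun g i =>
          (PySem.List.pyRange 0 width 1).foldl (fun g j =>
            pvPaint g (fromTop + i) (fromLeft + j) claim_id) g) st.1
      (g, st.2 + 1)) (grid, (1 : Int))).1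

-- ===== PORT B =====
-- one pass-1 iteration of Source B: cover[key] = (cover[key][0]+1, cover[key][1]) if key in cover else (1, cid)
def pvCoverStep (d : PySem.Dict (Int × Int) (Int × Int)) (key : Int × Int) (cid : Int) :
    PySem.Dict (Int × Int) (Int × Int) :=
  match d.get? key with
  | some e => d.insert key (e.1 + 1, e.2)
  | none => d.insert key (1, cid)

-- one pass-2 iteration of Source B: grid[r][c] = str(cid) if count == 1 and cell == "." else "X"
def pvWrite (g : List (List String)) (kv : (Int × Int) × (Int × Int)) : List (List String) :=
  let cell := PySem.List.pyGetD (PySem.List.pyGetD g kv.1.1 []) kv.1.2 ""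
  let v := if kv.2.1 == 1 && cell == "." then PySem.Int.toStr kv.2.2 else "X"
  PySem.List.pySetD g kv.1.1 (PySem.List.pySetD (PySem.List.pyGetD g kv.1.1 []) kv.1.2 v)

def drawMultipleSquares_alt (grid : List (List String)) (claim_list : List (List Int)) : List (List String) :=
  let cover := claim_list.foldl (fun d claim =>
      let claim_id := PySem.List.pyGetD claim 0 0
      let from_left := PySem.List.pyGetD claim 1 0
      let from_top := PySem.List.pyGetD claim 2 0
      let width := PySem.List.pyGetD claim 3 0
      let height := PySem.List.pyGetD claim 4 0
      (PySem.List.pyRange 0 height 1).foldl (fun d i =>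
        (PySem.List.pyRange 0 width 1).foldl (fun d j =>
          pvCoverStep d (from_top + i, from_left + j) claim_id) d) d)
    PySem.Dict.empty
  cover.items.foldl pvWrite grid

-- ===== PRECONDITION & SPEC =====
-- Pre_ excludes exactly the inputs on which Python A raises: a claim shorter than 5 entries
-- (IndexError on claim[4]) or a claimed cell whose row/column index falls outside Python's
-- accepted range -len..len-1 (IndexError on grid[...][...]).
def Pre_drawMultipleSquares (grid : List (List String)) (claim_list : List (List Int)) : Prop :=
  ∀ claim ∈ claim_list, 5 ≤ claim.length ∧
    ∀ i : Nat, i < (claim.getD 4 0).toNat →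
      PySem.Raise.InRange grid.length (claim.getD 2 0 + i) ∧
      ∀ j : Nat, j < (claim.getD 3 0).toNat →
        PySem.Raise.InRange (PySem.List.pyGetD grid (claim.getD 2 0 + (i : Int)) []).length
          (claim.getD 1 0 + j)
instance (grid : List (List String)) (claim_list : List (List Int)) : Decidable (Pre_drawMultipleSquares grid claim_list) := by unfold Pre_drawMultipleSquares; infer_instance

def pvWitness_drawMultipleSquares : List (List String) × List (List Int) :=
  ([[".", "."], [".", "X"]], [[7, 0, 0, 2, 2], [3, 1, 0, 1, 1]])

def Spec_drawMultipleSquares (grid : List (List String)) (claim_list : List (List Int)) (out : List (List String)) : Prop := out = drawMultipleSquares_alt grid claim_list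
instance (grid : List (List String)) (claim_list : List (List Int)) (out : List (List String)) : Decidable (Spec_drawMultipleSquares grid claim_list out) := by unfold Spec_drawMultipleSquares; infer_instance

-- ===== CLAIM (what is proved, stated in full; the proofs are below) =====
def Claim_equal_drawMultipleSquares : Prop := ∀ (grid : List (List String)) (claim_list : List (List Int)), Dom_drawMultipleSquares grid claim_list → Pre_drawMultipleSquares grid claim_list → Spec_drawMultipleSquares grid claim_list (drawMultipleSquares grid claim_list)

-- ===== LEMMAS AND PROOFS =====

-- Python index canonicalisation: the Nat index that xs[i] actually touches.
def pvIdx (n : Nat) (i : Int) : Nat := if 0 ≤ i then i.toNat else n - (-i).toNat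

def pvShape (g : List (List String)) : List Nat := g.map List.length

def pvCanon (sh : List Nat) (p : Int × Int) : Nat × Nat :=
  (pvIdx sh.length p.1, pvIdx (sh.getD (pvIdx sh.length p.1) 0) p.2)

def pvKeyOK (sh : List Nat) (p : Int × Int) : Prop :=
  PySem.Raise.InRange sh.length p.1 ∧
  PySem.Raise.InRange (sh.getD (pvIdx sh.length p.1) 0) p.2

def pvValid (sh : List Nat) (q : Nat × Nat) : Prop := q.1 < sh.length ∧ q.2 < sh.getD q.1 0

def pvGetCell (g : List (List String)) (q : Nat × Nat) : String := (g.getD q.1 []).getD q.2 ""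

def pvSetCell (g : List (List String)) (q : Nat × Nat) (v : String) : List (List String) :=
  g.set q.1 ((g.getD q.1 []).set q.2 v)

def pvVisitsOfClaim (claim : List Int) : List ((Int × Int) × Int) :=
  (PySem.List.pyRange 0 (PySem.List.pyGetD claim 4 0) 1).flatMap (fun i =>
    (PySem.List.pyRange 0 (PySem.List.pyGetD claim 3 0) 1).map (fun j =>
      ((PySem.List.pyGetD claim 2 0 + i, PySem.List.pyGetD claim 1 0 + j),
        PySem.List.pyGetD claim 0 0)))

def pvVisits (cl : List (List Int)) : List ((Int × Int) × Int) := cl.flatMap pvVisitsOfClaim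

def pvCoverVal (d : PySem.Dict (Int × Int) (Int × Int)) (k : Int × Int) (cid : Int) : Int × Int :=
  match d.get? k with
  | some e => (e.1 + 1, e.2)
  | none => (1, cid)

def pvCountK (l : List ((Int × Int) × Int)) (k : Int × Int) : Int :=
  (l.countP (fun v => v.1 == k) : Int)

def pvFirstId (l : List ((Int × Int) × Int)) (k : Int × Int) : Int :=
  match l.find? (fun v => v.1 == k) with
  | some v => v.2
  | none => 0

def pvPaintF (s : String) (v : (Int × Int) × Int) : String :=
  if s == "." then PySem.Int.toStr v.2 else "X"

def pvWriteF (s : String) (kv : (Int × Int) × (Int × Int)) : String :=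
  if kv.2.1 == 1 && s == "." then PySem.Int.toStr kv.2.2 else "X"

theorem pvIdx_lt (n : Nat) (i : Int) (h : PySem.Raise.InRange n i) : pvIdx n i < n := by
  obtain ⟨h1, h2⟩ := h
  unfold pvIdx
  split <;> omega
theorem pvPyIdx_eq (n : Nat) (i : Int) (h : PySem.Raise.InRange n i) :
    PySem.List.pyIdx? n i = some (pvIdx n i) := by
  obtain ⟨h1, h2⟩ := h
  unfold PySem.List.pyIdx? pvIdx
  split <;> simp [h1, h2]
theorem pvGetD_pvIdx {α : Type} {xs : List α} {i : Int} (d : α)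
    (h : PySem.Raise.InRange xs.length i) :
    PySem.List.pyGetD xs i d = xs.getD (pvIdx xs.length i) d := by
  rw [PySem.List.pyGetD, PySem.List.pyGet?, pvPyIdx_eq _ _ h]
  simp [List.getD_eq_getElem?_getD]
theorem pvSetD_pvIdx {α : Type} {xs : List α} {i : Int} (v : α)
    (h : PySem.Raise.InRange xs.length i) :
    PySem.List.pySetD xs i v = xs.set (pvIdx xs.length i) v := by
  rw [PySem.List.pySetD, PySem.List.pySet?, pvPyIdx_eq _ _ h]
  rfl
theorem pvLength_pvShape (g : List (List String)) : (pvShape g).length = g.length := by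
  simp [pvShape]
theorem pvGetD_pvShape (g : List (List String)) (q : Nat) :
    (pvShape g).getD q 0 = (g.getD q []).length := by
  simp [pvShape, List.getD_eq_getElem?_getD]
  rcases h : g[q]? with _ | row <;> simp [h]
theorem pvShape_setCell (g : List (List String)) (q : Nat × Nat) (v : String) :
    pvShape (pvSetCell g q v) = pvShape g := by
  unfold pvShape pvSetCell
  rw [List.map_set]
  by_cases h : q.1 < g.length
  · have hg : g.getD q.1 [] = g[q.1] := by
      simp [List.getD_eq_getElem?_getD, List.getElem?_eq_getElem h]
    rw [hg]
    simp only [List.length_set]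
    have hlen : q.1 < (g.map List.length).length := by simpa using h
    have : g[q.1].length = (g.map List.length)[q.1] := by simp
    rw [this, List.set_getElem_self hlen]
  · rw [List.set_eq_of_length_le (by simpa using Nat.le_of_not_lt h)]
theorem pvGetCell_setCell {g : List (List String)} {q : Nat × Nat}
    (hv : pvValid (pvShape g) q) (v : String) (r : Nat × Nat) :
    pvGetCell (pvSetCell g q v) r = if r = q then v else pvGetCell g r := by
  obtain ⟨h1, h2⟩ := hv
  rw [pvLength_pvShape] at h1
  rw [pvGetD_pvShape] at h2
  rcases r with ⟨r1, r2⟩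
  rcases q with ⟨q1, q2⟩
  simp only at h1 h2
  unfold pvGetCell pvSetCell
  by_cases hr1 : r1 = q1
  · subst hr1
    have e1 : (g.set r1 ((g.getD r1 []).set q2 v)).getD r1 [] = (g.getD r1 []).set q2 v := by
      simp [List.getD_eq_getElem?_getD, List.getElem?_set_self h1]
    rw [e1]
    by_cases hr2 : r2 = q2
    · subst hr2
      rw [if_pos rfl]
      rw [List.getD_eq_getElem?_getD] at h2
      simp [List.getD_eq_getElem?_getD, List.getElem?_set_self h2]
    · rw [if_neg (by simp [Prod.ext_iff, hr2])]
      simp [List.getD_eq_getElem?_getD, List.getElem?_set_ne (fun h => hr2 h.symm)]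
  · rw [if_neg (by simp [Prod.ext_iff, hr1])]
    have e1 : (g.set q1 ((g.getD q1 []).set q2 v)).getD r1 [] = g.getD r1 [] := by
      simp [List.getD_eq_getElem?_getD, List.getElem?_set_ne (fun h => hr1 h.symm)]
    rw [e1]
theorem pvValid_canon {sh : List Nat} {p : Int × Int} (h : pvKeyOK sh p) :
    pvValid sh (pvCanon sh p) := by
  obtain ⟨h1, h2⟩ := h
  exact ⟨pvIdx_lt _ _ h1, pvIdx_lt _ _ h2⟩

theorem pvKeyOK_iff (g : List (List String)) (p : Int × Int) :
    pvKeyOK (pvShape g) p ↔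
      (PySem.Raise.InRange g.length p.1 ∧
       PySem.Raise.InRange (g.getD (pvIdx g.length p.1) []).length p.2) := by
  unfold pvKeyOK
  rw [pvLength_pvShape, pvGetD_pvShape]

theorem pvPaint_eq {g : List (List String)} {p : Int × Int}
    (h : pvKeyOK (pvShape g) p) (cid : Int) :
    pvPaint g p.1 p.2 cid =
      pvSetCell g (pvCanon (pvShape g) p) (pvPaintF (pvGetCell g (pvCanon (pvShape g) p)) (p, cid)) := by
  obtain ⟨h1, h2⟩ := (pvKeyOK_iff g p).mp h
  have hrow : PySem.List.pyGetD g p.1 [] = g.getD (pvIdx g.length p.1) [] := pvGetD_pvIdx _ h1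
  have hcanon : pvCanon (pvShape g) p = (pvIdx g.length p.1,
      pvIdx (g.getD (pvIdx g.length p.1) []).length p.2) := by
    unfold pvCanon
    rw [pvLength_pvShape, pvGetD_pvShape]
  have hcell : pvGetCell g (pvCanon (pvShape g) p) =
      PySem.List.pyGetD (PySem.List.pyGetD g p.1 []) p.2 "" := by
    rw [hcanon, hrow, pvGetD_pvIdx _ h2]
    rfl
  have hcell' : PySem.List.pyGetD (g.getD (pvIdx g.length p.1) []) p.2 "" =
      pvGetCell g (pvIdx g.length p.1, pvIdx (g.getD (pvIdx g.length p.1) []).length p.2) := by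
    rw [hcanon] at hcell
    rw [hcell, hrow]
  unfold pvPaint pvSetCell pvPaintF
  rw [hcanon]
  simp only [hrow, pvSetD_pvIdx _ h2, pvSetD_pvIdx _ h1, hcell']
  split <;> rename_i hc <;> simp only [hc, if_true, if_false, Bool.false_eq_true]

theorem pvWrite_eq {g : List (List String)} {kv : (Int × Int) × (Int × Int)}
    (h : pvKeyOK (pvShape g) kv.1) :
    pvWrite g kv =
      pvSetCell g (pvCanon (pvShape g) kv.1) (pvWriteF (pvGetCell g (pvCanon (pvShape g) kv.1)) kv) := by
  obtain ⟨h1, h2⟩ := (pvKeyOK_iff g kv.1).mp h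
  have hrow : PySem.List.pyGetD g kv.1.1 [] = g.getD (pvIdx g.length kv.1.1) [] := pvGetD_pvIdx _ h1
  have hcanon : pvCanon (pvShape g) kv.1 = (pvIdx g.length kv.1.1,
      pvIdx (g.getD (pvIdx g.length kv.1.1) []).length kv.1.2) := by
    unfold pvCanon
    rw [pvLength_pvShape, pvGetD_pvShape]
  have hcell : pvGetCell g (pvCanon (pvShape g) kv.1) =
      PySem.List.pyGetD (PySem.List.pyGetD g kv.1.1 []) kv.1.2 "" := by
    rw [hcanon, hrow, pvGetD_pvIdx _ h2]
    rfl
  have hcell' : PySem.List.pyGetD (g.getD (pvIdx g.length kv.1.1) []) kv.1.2 "" =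
      pvGetCell g (pvIdx g.length kv.1.1, pvIdx (g.getD (pvIdx g.length kv.1.1) []).length kv.1.2) := by
    rw [hcanon] at hcell
    rw [hcell, hrow]
  unfold pvWrite pvSetCell pvWriteF
  rw [hcanon]
  simp only [hrow, pvSetD_pvIdx _ h2, pvSetD_pvIdx _ h1, hcell']
-- writes at a cell only affect that cell: localize a fold of cell writes to each cell
theorem pvFoldlCells {alpha : Type} (sh : List Nat) (key : alpha → Int × Int)
    (f : String → alpha → String)
    (step : List (List String) → alpha → List (List String)) :
    ∀ (l : List alpha)
      (_ : ∀ (g' : List (List String)) (x : alpha), x ∈ l → pvShape g' = sh →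
        step g' x = pvSetCell g' (pvCanon sh (key x)) (f (pvGetCell g' (pvCanon sh (key x))) x))
      (_ : ∀ x ∈ l, pvKeyOK sh (key x))
      (g' : List (List String)) (_ : pvShape g' = sh),
      pvShape (l.foldl step g') = sh ∧
      ∀ q, pvGetCell (l.foldl step g') q =
        l.foldl (fun s x => if pvCanon sh (key x) = q then f s x else s) (pvGetCell g' q) := by
  intro l
  induction l with
  | nil => exact fun _ _ g' hg' => ⟨hg', fun q => rfl⟩
  | cons x t ih =>
    intro hstep hok g' hg'
    have hx := hstep g' x (List.mem_cons_self) hg'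
    have hokx := hok x (List.mem_cons_self)
    have hvalid : pvValid (pvShape g') (pvCanon sh (key x)) := by
      rw [hg']; exact pvValid_canon hokx
    have hksh : pvShape (step g' x) = sh := by
      rw [hx, pvShape_setCell]; exact hg'
    obtain ⟨ihs, ihc⟩ := ih (fun g'' y hy hsh => hstep g'' y (List.mem_cons_of_mem _ hy) hsh)
      (fun y hy => hok y (List.mem_cons_of_mem _ hy)) (step g' x) hksh
    refine ⟨by simpa using ihs, ?_⟩
    intro q
    simp only [List.foldl_cons]
    rw [ihc q, hx, pvGetCell_setCell hvalid]
    by_cases hq : pvCanon sh (key x) = q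
    · rw [hq, if_pos rfl]
    · rw [if_neg (fun h => hq h.symm), if_neg hq]

theorem pvFoldlPair {β γ : Type} (F : γ → β → γ) (l : List β) :
    ∀ (g : γ) (k0 : Int),
      (l.foldl (fun (st : γ × Int) c => (F st.1 c, st.2 + 1)) (g, k0)).1 = l.foldl F g := by
  induction l with
  | nil => intro g k0; rfl
  | cons c t ih => intro g k0; simp only [List.foldl_cons]; exact ih (F g c) (k0 + 1)

theorem pvFoldlFlatMap {α β γ : Type} (f : α → List β) (F : γ → β → γ) (l : List α) :
    ∀ (init : γ), (l.flatMap f).foldl F init = l.foldl (fun acc x => (f x).foldl F acc) init := by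
  induction l with
  | nil => intro init; rfl
  | cons x t ih =>
    intro init
    simp only [List.flatMap_cons, List.foldl_append, List.foldl_cons]
    exact ih _

theorem pvA_eq (g : List (List String)) (cl : List (List Int)) :
    drawMultipleSquares g cl = (pvVisits cl).foldl (fun g v => pvPaint g v.1.1 v.1.2 v.2) g := by
  refine Eq.trans
    (pvFoldlPair (fun g claim =>
      (PySem.List.pyRange 0 (PySem.List.pyGetD claim 4 0) 1).foldl (fun g i =>
        (PySem.List.pyRange 0 (PySem.List.pyGetD claim 3 0) 1).foldl (fun g j =>
          pvPaint g (PySem.List.pyGetD claim 2 0 + i) (PySem.List.pyGetD claim 1 0 + j)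
            (PySem.List.pyGetD claim 0 0)) g) g) cl g 1) ?_
  unfold pvVisits pvVisitsOfClaim
  simp only [pvFoldlFlatMap, List.foldl_map]

def pvCover (cl : List (List Int)) : PySem.Dict (Int × Int) (Int × Int) :=
  (pvVisits cl).foldl (fun d v => pvCoverStep d v.1 v.2) PySem.Dict.empty

theorem pvB_eq (g : List (List String)) (cl : List (List Int)) :
    drawMultipleSquares_alt g cl = (pvCover cl).items.foldl pvWrite g := by
  unfold drawMultipleSquares_alt pvCover
  dsimp only
  unfold pvVisits pvVisitsOfClaim
  simp only [pvFoldlFlatMap, List.foldl_map]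

theorem pvCoverStep_insert (d : PySem.Dict (Int × Int) (Int × Int)) (k : Int × Int) (cid : Int) :
    pvCoverStep d k cid = d.insert k (pvCoverVal d k cid) := by
  unfold pvCoverStep pvCoverVal
  cases h : d.get? k <;> rfl

theorem pvCountK_cons_self (v : (Int × Int) × Int) (t : List ((Int × Int) × Int)) (k : Int × Int)
    (h : v.1 = k) : pvCountK (v :: t) k = pvCountK t k + 1 := by
  unfold pvCountK
  rw [List.countP_cons, if_pos (by simpa using h)]
  push_cast
  ring

theorem pvCountK_cons_ne (v : (Int × Int) × Int) (t : List ((Int × Int) × Int)) (k : Int × Int)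
    (h : ¬ v.1 = k) : pvCountK (v :: t) k = pvCountK t k := by
  unfold pvCountK
  rw [List.countP_cons, if_neg (by simpa using h)]
  push_cast
  ring

theorem pvCover_get? (l : List ((Int × Int) × Int)) :
    ∀ (d : PySem.Dict (Int × Int) (Int × Int)) (k : Int × Int),
      (l.foldl (fun d v => pvCoverStep d v.1 v.2) d).get? k =
        match d.get? k with
        | some e => some (e.1 + pvCountK l k, e.2)
        | none =>
          match l.find? (fun v => v.1 == k) with
          | some v => some (pvCountK l k, v.2)
          | none => none := by
  induction l with
  | nil =>
    intro d k
    cases h : d.get? k <;> simp [pvCountK, h]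
  | cons v t ih =>
    intro d k
    simp only [List.foldl_cons]
    rw [ih]
    rw [pvCoverStep_insert, PySem.Dict.get?_insert]
    by_cases hk : v.1 = k
    · rw [if_pos hk.symm]
      unfold pvCoverVal
      rw [hk]
      cases h : d.get? k with
      | some e =>
        simp only []
        rw [pvCountK_cons_self v t k hk]
        congr 1
        rw [Prod.ext_iff]
        constructor
        · simp only []
          ring
        · rfl
      | none =>
        simp only []
        rw [show List.find? (fun w => w.1 == k) (v :: t) = some v from List.find?_cons_of_pos (by simpa using hk)]
        rw [pvCountK_cons_self v t k hk]
        congr 1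
        rw [Prod.ext_iff]
        constructor
        · simp only []
          ring
        · rfl
    · rw [if_neg (fun hke => hk hke.symm)]
      rw [pvCountK_cons_ne v t k hk]
      cases h : d.get? k with
      | some e => rfl
      | none =>
        simp only []
        rw [show List.find? (fun w => w.1 == k) (v :: t) = List.find? (fun w => w.1 == k) t from List.find?_cons_of_neg (by simpa using hk)]

theorem pvCoverFun_eq :
    (fun (d : PySem.Dict (Int × Int) (Int × Int)) (v : (Int × Int) × Int) =>
        pvCoverStep d v.1 v.2) =
      fun d v => d.insert v.1 (pvCoverVal d v.1 v.2) := by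
  funext d v
  exact pvCoverStep_insert d v.1 v.2

theorem pvCover_nodup_keys (l : List ((Int × Int) × Int)) :
    (l.foldl (fun d v => pvCoverStep d v.1 v.2) PySem.Dict.empty).keys.Nodup := by
  rw [pvCoverFun_eq]
  exact PySem.Dict.nodup_keys_foldl_insert_key l (fun v => v.1) _ _ PySem.Dict.nodup_keys_empty

theorem pvCover_keys (l : List ((Int × Int) × Int)) :
    (l.foldl (fun d v => pvCoverStep d v.1 v.2) PySem.Dict.empty).keys =
      PySem.List.dedup (l.map (fun v => v.1)) := by
  rw [pvCoverFun_eq]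
  rw [PySem.Dict.keys_foldl_insert_key]
  rw [PySem.Dict.keys_empty]
  rfl

theorem pvCover_items (l : List ((Int × Int) × Int)) :
    (l.foldl (fun d v => pvCoverStep d v.1 v.2) PySem.Dict.empty).items =
      (PySem.List.dedup (l.map (fun v => v.1))).map (fun k => (k, (pvCountK l k, pvFirstId l k))) := by
  rw [PySem.Dict.items_eq_map_keys _ (pvCover_nodup_keys l) ((0 : Int), (0 : Int))]
  rw [pvCover_keys]
  apply List.map_congr_left
  intro k hk
  have hkK : k ∈ l.map (fun v => v.1) := by
    rw [← PySem.List.mem_dedup]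
    exact hk
  obtain ⟨v, hv, hveq⟩ := List.mem_map.mp hkK
  have hfind : (l.find? (fun v => v.1 == k)).isSome := by
    rw [List.find?_isSome]
    exact ⟨v, hv, by simpa using hveq⟩
  cases hf : l.find? (fun v => v.1 == k) with
  | none => rw [hf] at hfind; simp at hfind
  | some w =>
    have hget : (l.foldl (fun d v => pvCoverStep d v.1 v.2) PySem.Dict.empty).get? k =
        some (pvCountK l k, pvFirstId l k) := by
      rw [pvCover_get?, PySem.Dict.get?_empty]
      simp only []
      rw [hf]
      unfold pvFirstId
      rw [hf]
    rw [PySem.Dict.getD_of_get?_eq_some _ ((0 : Int), (0 : Int)) hget]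

theorem pvDigitChar_ne_dot : ∀ (m : Nat), Nat.digitChar m ≠ '.'
  | 0 => by decide
  | 1 => by decide
  | 2 => by decide
  | 3 => by decide
  | 4 => by decide
  | 5 => by decide
  | 6 => by decide
  | 7 => by decide
  | 8 => by decide
  | 9 => by decide
  | 10 => by decide
  | 11 => by decide
  | 12 => by decide
  | 13 => by decide
  | 14 => by decide
  | 15 => by decide
  | (_+16) => by simp [Nat.digitChar]

theorem pvToDigitsCore_mem (b : Nat) :
    ∀ (f n : Nat) (acc : List Char) (c : Char),
      c ∈ Nat.toDigitsCore b f n acc → c ∈ acc ∨ ∃ m, c = Nat.digitChar m := by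
  intro f
  induction f with
  | zero => intro n acc c h; exact Or.inl h
  | succ f ih =>
    intro n acc c h
    rw [Nat.toDigitsCore] at h
    by_cases hz : n / b = 0
    · rw [if_pos hz] at h
      rcases List.mem_cons.mp h with h | h
      · exact Or.inr ⟨n % b, h⟩
      · exact Or.inl h
    · rw [if_neg hz] at h
      rcases ih _ _ _ h with h | h
      · rcases List.mem_cons.mp h with h | h
        · exact Or.inr ⟨n % b, h⟩
        · exact Or.inl h
      · exact Or.inr h

theorem pvToStr_ne_dot (n : Int) : PySem.Int.toStr n ≠ "." := by
  intro h
  have h2 : (PySem.Int.toStr n).toList = ".".toList := by rw [h]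
  rw [PySem.Int.toList_toStr] at h2
  unfold PySem.Int.toChars at h2
  split at h2
  · simp at h2
  · have hm : '.' ∈ Nat.toDigits 10 n.toNat := by rw [h2]; simp
    rcases pvToDigitsCore_mem 10 _ _ _ _ hm with h3 | ⟨m, h3⟩
    · simp at h3
    · exact pvDigitChar_ne_dot m h3.symm

theorem pvPaintFold_stuck (l : List ((Int × Int) × Int)) :
    ∀ s, s ≠ "." → l.foldl pvPaintF s = if l = [] then s else "X" := by
  induction l with
  | nil => intro s _; simp
  | cons v t ih =>
    intro s hs
    simp only [List.foldl_cons]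
    have hstep : pvPaintF s v = "X" := by
      unfold pvPaintF
      rw [if_neg (by simpa using hs)]
    rw [hstep, ih "X" (by decide)]
    simp

theorem pvWriteFold_stuck (l : List ((Int × Int) × (Int × Int))) :
    ∀ s, s ≠ "." → l.foldl pvWriteF s = if l = [] then s else "X" := by
  induction l with
  | nil => intro s _; simp
  | cons kv t ih =>
    intro s hs
    simp only [List.foldl_cons]
    have hstep : pvWriteF s kv = "X" := by
      unfold pvWriteF
      rw [if_neg (by simp [hs])]
    rw [hstep, ih "X" (by decide)]
    simp

theorem pvWriteF_ne (s : String) (kv : (Int × Int) × (Int × Int)) (h : s ≠ ".") :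
    pvWriteF s kv = "X" := by
  unfold pvWriteF
  rw [if_neg (by simp [h])]

theorem pvNodupAllEq {α : Type} {l : List α} {a : α} (hn : l.Nodup) (ha : a ∈ l)
    (hall : ∀ x ∈ l, x = a) : l = [a] := by
  cases l with
  | nil => cases ha
  | cons x t =>
    have hx : x = a := hall x List.mem_cons_self
    subst hx
    cases t with
    | nil => rfl
    | cons y u =>
      have hy : y = x := hall y (by simp)
      subst hy
      simp [List.nodup_cons] at hn

theorem pvGridExt {g g' : List (List String)} (hsh : pvShape g = pvShape g')
    (hc : ∀ q, pvGetCell g q = pvGetCell g' q) : g = g' := by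
  have hlen : g.length = g'.length := by
    have := congrArg List.length hsh
    simpa [pvShape] using this
  apply List.ext_getElem hlen
  intro i hi hi'
  have hrl : g[i].length = g'[i].length := by
    have h1 := pvGetD_pvShape g i
    have h2 := pvGetD_pvShape g' i
    rw [hsh] at h1
    rw [h1] at h2
    simpa [List.getD_eq_getElem?_getD, List.getElem?_eq_getElem, hi, hi'] using h2
  apply List.ext_getElem hrl
  intro j hj hj'
  have := hc (i, j)
  unfold pvGetCell at this
  simpa [List.getD_eq_getElem?_getD, List.getElem?_eq_getElem, hi, hi', hj, hj'] using this

-- the combinatorial heart: at one cell, A's repeated painting and B's single writes agree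
theorem pvCellAgree (sh : List Nat) (V : List ((Int × Int) × Int)) (q : Nat × Nat) (init : String) :
    (V.filter (fun v => decide (pvCanon sh v.1 = q))).foldl pvPaintF init =
      (((PySem.List.dedup (V.map (fun v => v.1))).filter (fun k => decide (pvCanon sh k = q))).map
        (fun k => (k, (pvCountK V k, pvFirstId V k)))).foldl pvWriteF init := by
  have hDmem : ∀ k, k ∈ (PySem.List.dedup (V.map (fun v => v.1))).filter
      (fun k => decide (pvCanon sh k = q)) ↔ ((∃ v ∈ V, v.1 = k) ∧ pvCanon sh k = q) := by
    intro k
    simp [List.mem_filter, PySem.List.mem_dedup]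
  cases hL : V.filter (fun v => decide (pvCanon sh v.1 = q)) with
  | nil =>
    have hD : (PySem.List.dedup (V.map (fun v => v.1))).filter
        (fun k => decide (pvCanon sh k = q)) = [] := by
      rw [List.filter_eq_nil_iff]
      intro k hk
      simp only [decide_eq_true_eq]
      intro hcq
      have hkK : k ∈ V.map (fun v => v.1) := (PySem.List.mem_dedup _ _).mp hk
      obtain ⟨v, hv, hveq⟩ := List.mem_map.mp hkK
      have := List.filter_eq_nil_iff.mp hL v hv
      simp only [decide_eq_true_eq] at this
      exact this (by rw [hveq]; exact hcq)
    rw [hD]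
    rfl
  | cons v rest =>
    have hvL : v ∈ V.filter (fun v => decide (pvCanon sh v.1 = q)) := by
      rw [hL]; exact List.mem_cons_self
    have hv : v ∈ V ∧ pvCanon sh v.1 = q := by
      have := List.mem_filter.mp hvL
      simpa using this
    have hvD : v.1 ∈ (PySem.List.dedup (V.map (fun v => v.1))).filter
        (fun k => decide (pvCanon sh k = q)) :=
      (hDmem v.1).mpr ⟨⟨v, hv.1, rfl⟩, hv.2⟩
    have hDne : (PySem.List.dedup (V.map (fun v => v.1))).filter
        (fun k => decide (pvCanon sh k = q)) ≠ [] := fun h => by rw [h] at hvD; cases hvD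
    by_cases hinit : init = "."
    · subst hinit
      cases hrest : rest with
      | nil =>
        rw [hrest] at hL
        have hone : ∀ x ∈ V, pvCanon sh x.1 = q → x = v := by
          intro x hx hcx
          have hxf : x ∈ V.filter (fun v => decide (pvCanon sh v.1 = q)) :=
            List.mem_filter.mpr ⟨hx, by simpa using hcx⟩
          rw [hL] at hxf
          simpa using hxf
        have hallD : ∀ k ∈ (PySem.List.dedup (V.map (fun v => v.1))).filter
            (fun k => decide (pvCanon sh k = q)), k = v.1 := by
          intro k hk
          obtain ⟨⟨x, hx, hxeq⟩, hcq⟩ := (hDmem k).mp hk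
          have hxv := hone x hx (by rw [hxeq]; exact hcq)
          rw [← hxeq, hxv]
        have hD : (PySem.List.dedup (V.map (fun v => v.1))).filter
            (fun k => decide (pvCanon sh k = q)) = [v.1] :=
          pvNodupAllEq ((PySem.List.nodup_dedup _).filter _) hvD hallD
        have hfe : V.filter (fun x => x.1 == v.1) = V.filter (fun v => decide (pvCanon sh v.1 = q)) := by
          apply List.filter_congr
          intro x hx
          by_cases hxk : x.1 = v.1
          · have h1 : (x.1 == v.1) = true := by simpa using hxk
            have h2 : decide (pvCanon sh x.1 = q) = true := by
              rw [decide_eq_true_eq, hxk]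
              exact hv.2
            rw [h1, h2]
          · have h1 : (x.1 == v.1) = false := by simpa using hxk
            have h2 : decide (pvCanon sh x.1 = q) = false := by
              rw [decide_eq_false_iff_not]
              intro hcx
              exact hxk (by rw [hone x hx hcx])
            rw [h1, h2]
        have hcount : pvCountK V v.1 = 1 := by
          unfold pvCountK
          rw [List.countP_eq_length_filter, hfe, hL]
          rfl
        have hfid : pvFirstId V v.1 = v.2 := by
          unfold pvFirstId
          rw [← List.head?_filter, hfe, hL]
          rfl
        rw [hD]
        simp only [List.map_cons, List.map_nil]
        rw [hcount, hfid]
        simp [pvPaintF, pvWriteF]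
      | cons w t =>
        have hlhs : List.foldl pvPaintF "." (v :: w :: t) = "X" := by
          rw [List.foldl_cons]
          have h1 : pvPaintF "." v = PySem.Int.toStr v.2 := by simp [pvPaintF]
          rw [h1, pvPaintFold_stuck _ _ (pvToStr_ne_dot v.2)]
          simp
        rw [hlhs]
        rw [hrest] at hL
        cases hD : (PySem.List.dedup (V.map (fun v => v.1))).filter
            (fun k => decide (pvCanon sh k = q)) with
        | nil => exact absurd hD hDne
        | cons k ks =>
          cases hks : ks with
          | nil =>
            -- a single distinct key covers this cell at least twice
            rw [hks] at hD
            have hallk : ∀ x ∈ V, pvCanon sh x.1 = q → x.1 = k := by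
              intro x hx hcx
              have hxD : x.1 ∈ (PySem.List.dedup (V.map (fun v => v.1))).filter
                  (fun k => decide (pvCanon sh k = q)) :=
                (hDmem x.1).mpr ⟨⟨x, hx, rfl⟩, hcx⟩
              rw [hD] at hxD
              simpa using hxD
            have hkq : pvCanon sh k = q := by
              have := (hDmem k).mp (by rw [hD]; exact List.mem_cons_self)
              exact this.2
            have hfe : V.filter (fun x => x.1 == k) = V.filter (fun v => decide (pvCanon sh v.1 = q)) := by
              apply List.filter_congr
              intro x hx
              by_cases hxk : x.1 = k
              · have h1 : (x.1 == k) = true := by simpa using hxk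
                have h2 : decide (pvCanon sh x.1 = q) = true := by
                  rw [decide_eq_true_eq, hxk]
                  exact hkq
                rw [h1, h2]
              · have h1 : (x.1 == k) = false := by simpa using hxk
                have h2 : decide (pvCanon sh x.1 = q) = false := by
                  rw [decide_eq_false_iff_not]
                  intro hcx
                  exact hxk (hallk x hx hcx)
                rw [h1, h2]
            have hcount : pvCountK V k = (t.length : Int) + 2 := by
              unfold pvCountK
              rw [List.countP_eq_length_filter, hfe, hL]
              simp
              ring
            have hcne : (pvCountK V k == (1 : Int)) = false := by
              rw [hcount]
              rw [beq_eq_false_iff_ne]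
              omega
            simp only [List.map_cons, List.map_nil, List.foldl_cons, List.foldl_nil]
            unfold pvWriteF
            simp [hcne]
          | cons k2 ks2 =>
            -- at least two distinct keys cover this cell
            rw [hks] at hD
            simp only [List.map_cons, List.foldl_cons]
            have hne : pvWriteF "." (k, (pvCountK V k, pvFirstId V k)) ≠ "." := by
              unfold pvWriteF
              split
              · exact pvToStr_ne_dot _
              · decide
            rw [pvWriteF_ne _ _ hne, pvWriteFold_stuck _ _ (by decide)]
            simp
    · rw [pvPaintFold_stuck _ init hinit, pvWriteFold_stuck _ init hinit]
      rw [if_neg (List.cons_ne_nil v rest)]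
      rw [if_neg (fun hmap => hDne (List.map_eq_nil_iff.mp hmap))]

theorem pvVisits_ok {g : List (List String)} {cl : List (List Int)}
    (hpre : Pre_drawMultipleSquares g cl) :
    ∀ v ∈ pvVisits cl, pvKeyOK (pvShape g) v.1 := by
  intro v hv
  obtain ⟨claim, hcl, hvc⟩ := List.mem_flatMap.mp hv
  unfold pvVisitsOfClaim at hvc
  obtain ⟨i, hi, hvi⟩ := List.mem_flatMap.mp hvc
  obtain ⟨j, hj, hvj⟩ := List.mem_map.mp hvi
  obtain ⟨hi0, hih⟩ := PySem.List.mem_pyRange_one.mp hi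
  obtain ⟨hj0, hjw⟩ := PySem.List.mem_pyRange_one.mp hj
  obtain ⟨hlen, hpre2⟩ := hpre claim hcl
  have hg4 : PySem.List.pyGetD claim 4 0 = claim.getD 4 0 := by
    have h4 : ((4 : Nat) : Int) = (4 : Int) := by norm_num
    rw [← h4, PySem.List.pyGetD_natCast]
  have hg3 : PySem.List.pyGetD claim 3 0 = claim.getD 3 0 := by
    have h3 : ((3 : Nat) : Int) = (3 : Int) := by norm_num
    rw [← h3, PySem.List.pyGetD_natCast]
  have hg2 : PySem.List.pyGetD claim 2 0 = claim.getD 2 0 := by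
    have h2 : ((2 : Nat) : Int) = (2 : Int) := by norm_num
    rw [← h2, PySem.List.pyGetD_natCast]
  have hg1 : PySem.List.pyGetD claim 1 0 = claim.getD 1 0 := by
    have h1 : ((1 : Nat) : Int) = (1 : Int) := by norm_num
    rw [← h1, PySem.List.pyGetD_natCast]
  have hi' : i = (i.toNat : Int) := by omega
  have hj' : j = (j.toNat : Int) := by omega
  have hiT : i.toNat < (claim.getD 4 0).toNat := by rw [hg4] at hih; omega
  obtain ⟨hrow, hcols⟩ := hpre2 i.toNat hiT
  have hjT : j.toNat < (claim.getD 3 0).toNat := by rw [hg3] at hjw; omega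
  have hcol := hcols j.toNat hjT
  subst hvj
  rw [pvKeyOK_iff]
  dsimp only
  have e2 : PySem.List.pyGetD claim 2 0 + i = claim.getD 2 0 + (i.toNat : Int) := by
    rw [hg2]; omega
  have e1 : PySem.List.pyGetD claim 1 0 + j = claim.getD 1 0 + (j.toNat : Int) := by
    rw [hg1]; omega
  have hrw : PySem.List.pyGetD g (claim.getD 2 0 + (i.toNat : Int)) [] =
      g.getD (pvIdx g.length (claim.getD 2 0 + (i.toNat : Int))) [] := pvGetD_pvIdx _ hrow
  rw [hrw] at hcol
  constructor
  · rw [e2]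
    exact hrow
  · rw [e2, e1]
    exact hcol

theorem pvScanFilter {β : Type} (P : β → Prop) [DecidablePred P] (f : String → β → String)
    (l : List β) (i : String) :
    l.foldl (fun s x => if P x then f s x else s) i =
      (l.filter (fun x => decide (P x))).foldl f i := by
  rw [List.foldl_filter]
  congr 1
  funext s x
  by_cases h : P x <;> simp [h]

-- ===== VERDICT (by name: the statement is the Claim_ definition above) =====
theorem drawMultipleSquares_spec : Claim_equal_drawMultipleSquares := by
  intro grid cl _hdom hpre
  unfold Spec_drawMultipleSquares
  rw [pvA_eq, pvB_eq]
  have hok := pvVisits_ok hpre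
  have hitems := pvCover_items (pvVisits cl)
  have hokB : ∀ kv ∈ (pvCover cl).items, pvKeyOK (pvShape grid) kv.1 := by
    intro kv hkv
    unfold pvCover at hkv
    rw [hitems] at hkv
    obtain ⟨k, hk, hkeq⟩ := List.mem_map.mp hkv
    have hkK := (PySem.List.mem_dedup _ _).mp hk
    obtain ⟨v, hv, hveq⟩ := List.mem_map.mp hkK
    rw [← hkeq]
    dsimp only
    rw [← hveq]
    exact hok v hv
  have hA := pvFoldlCells (pvShape grid) (fun v => v.1) pvPaintF
      (fun g v => pvPaint g v.1.1 v.1.2 v.2) (pvVisits cl)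
      (fun g' x hx hsh => by
        have hk : pvKeyOK (pvShape g') x.1 := by rw [hsh]; exact hok x hx
        have hp := pvPaint_eq hk x.2
        rw [hsh] at hp
        simpa using hp)
      hok grid rfl
  have hB := pvFoldlCells (pvShape grid) (fun kv => kv.1) pvWriteF pvWrite (pvCover cl).items
      (fun g' kv hkv hsh => by
        have hk : pvKeyOK (pvShape g') kv.1 := by rw [hsh]; exact hokB kv hkv
        have hp := pvWrite_eq hk
        rw [hsh] at hp
        exact hp)
      hokB grid rfl
  apply pvGridExt (hA.1.trans hB.1.symm)
  intro q
  rw [hA.2 q, hB.2 q]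
  rw [pvScanFilter (fun v => pvCanon (pvShape grid) v.1 = q) pvPaintF]
  rw [pvScanFilter (fun kv => pvCanon (pvShape grid) kv.1 = q) pvWriteF]
  unfold pvCover
  rw [hitems, List.filter_map]
  exact pvCellAgree (pvShape grid) (pvVisits cl) q (pvGetCell grid q)
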